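-- pv_equiv track=rewrite | github.com/shufanchen/electrical-life-prediction-software | Data_refine.py | creat_file_name
-- ===== SOURCE A (Python) =====
-- def creat_file_name(file_info):
--     """返回要生成数据集的文件名"""
--     file_name = []
--     flag = 0
--     for i in file_info[::-1]:
--         if (i == '/' or i=='\\') and flag == 0:
--             flag += 1
--             continue
--         elif (i == '/' or i=='\\') and flag >= 1:
--             break
--         else:
--             flag += 1
--             file_name.append(i)
--     file_name.reverse()
--     output_file_name = ''
--     for i in file_name:
--         output_file_name += i
--     output_file_name1 = output_file_name + '_database.csv'
--     return output_file_name1, output_file_name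
-- ===== SOURCE B (Python) =====
-- def creat_file_name(file_info):
--     """返回要生成数据集的文件名"""
--     s = file_info
--     if s and (s[-1] == '/' or s[-1] == '\\'):
--         s = s[:-1]
--     idx = max(s.rfind('/'), s.rfind('\\'))
--     name = s[idx + 1:]
--     return name + '_database.csv', name
-- ===== Notes on version B (the rewrite author's own statement) =====
-- stated objective: simpler
-- what changed: Replaced the reversed-iteration flag state machine with accumulator list, reverse and char-by-char string concat by: strip one trailing separator, locate the last separator with rfind, and slice the suffix.
import Mathlib
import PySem

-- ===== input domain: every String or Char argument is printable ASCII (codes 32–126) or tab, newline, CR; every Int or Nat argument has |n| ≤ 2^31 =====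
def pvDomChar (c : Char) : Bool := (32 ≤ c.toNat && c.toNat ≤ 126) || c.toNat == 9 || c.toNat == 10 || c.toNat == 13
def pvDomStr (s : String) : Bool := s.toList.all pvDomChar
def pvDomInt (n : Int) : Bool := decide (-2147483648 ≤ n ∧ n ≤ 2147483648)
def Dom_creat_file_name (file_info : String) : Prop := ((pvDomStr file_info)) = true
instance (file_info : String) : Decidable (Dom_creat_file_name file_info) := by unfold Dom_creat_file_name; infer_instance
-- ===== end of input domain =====

-- B replaces A's reversed-iteration flag state machine (accumulator list + reverse + char-by-char concat)
-- by: strip one trailing separator, then slice after the last separator located with rfind (objective: simpler).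

-- ===== PORT A =====
-- the 'for i in file_info[::-1]' loop with its flag / continue / break, state (file_name, flag)
def creatLoopA : List Char → List Char → Int → List Char
  | [], file_name, _ => file_name
  | i :: rest, file_name, flag =>
    if (i = '/' ∨ i = '\\') ∧ flag = 0 then creatLoopA rest file_name (flag + 1)
    else if (i = '/' ∨ i = '\\') ∧ flag ≥ 1 then file_name
    else creatLoopA rest (file_name ++ [i]) (flag + 1)

def creat_file_name (file_info : String) : String × String :=
  let file_name := creatLoopA file_info.toList.reverse [] 0   -- file_info[::-1] iterated char by char
  let file_name := file_name.reverse
  let output_file_name := file_name.foldl (fun acc i => acc.push i) ""   -- output_file_name += i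
  let output_file_name1 := output_file_name ++ "_database.csv"
  (output_file_name1, output_file_name)

-- ===== PORT B =====
def creat_file_name_alt (file_info : String) : String × String :=
  let s := file_info
  let s := if s ≠ "" ∧ (PySem.Str.pyGet? s (-1) = some '/' ∨ PySem.Str.pyGet? s (-1) = some '\\')
           then PySem.Str.slice s none (some (-1)) else s
  let idx := max (PySem.Str.rfind s "/") (PySem.Str.rfind s "\\")
  let name := PySem.Str.slice s (some (idx + 1)) none
  (name ++ "_database.csv", name)

-- ===== PRECONDITION & SPEC =====
def Spec_creat_file_name (file_info : String) (out : String × String) : Prop := out = creat_file_name_alt file_info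
instance (file_info : String) (out : String × String) : Decidable (Spec_creat_file_name file_info out) := by unfold Spec_creat_file_name; infer_instance

-- ===== CLAIM (what is proved, stated in full; the proofs are below) =====
def Claim_equal_creat_file_name : Prop := ∀ (file_info : String), Dom_creat_file_name file_info → Spec_creat_file_name file_info (creat_file_name file_info)

-- ===== LEMMAS AND PROOFS =====

-- `notSep c` : c is neither separator
def notSep (c : Char) : Bool := !(c == '/' || c == '\\')

lemma creatLoopA_pos (r acc : List Char) (f : Int) (hf : 1 ≤ f) :
    creatLoopA r acc f = acc ++ r.takeWhile notSep := by
  induction r generalizing acc f with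
  | nil => simp [creatLoopA]
  | cons c rest ih =>
    by_cases hc : c = '/' ∨ c = '\\'
    · have hns : notSep c = false := by
        rcases hc with hc | hc <;> simp [notSep, hc]
      simp [creatLoopA, hc, show ¬ f = 0 by omega, hf, List.takeWhile_cons, hns]
    · have h1 : notSep c = true := by
        simp only [notSep]
        simp only [not_or] at hc
        simp [hc.1, hc.2]
      simp only [creatLoopA, hc, false_and, if_neg, ite_false]
      rw [ih _ _ (by omega)]
      simp [List.takeWhile_cons, h1]

lemma creatLoopA_zero (r : List Char) :
    creatLoopA r [] 0 =
      (if r.head? = some '/' ∨ r.head? = some '\\' then r.tail else r).takeWhile notSep := by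
  cases r with
  | nil => simp [creatLoopA]
  | cons c rest =>
    by_cases hc : c = '/' ∨ c = '\\'
    · have hh : (c :: rest).head? = some '/' ∨ (c :: rest).head? = some '\\' := by
        rcases hc with hc | hc <;> simp [hc]
      simp only [creatLoopA, hc, true_and, if_pos rfl, if_pos hh, List.tail_cons]
      exact creatLoopA_pos rest [] 1 le_rfl
    · have h1 : notSep c = true := by
        simp only [notSep]
        simp only [not_or] at hc
        simp [hc.1, hc.2]
      have hh : ¬ ((c :: rest).head? = some '/' ∨ (c :: rest).head? = some '\\') := by
        simpa using hc
      simp only [creatLoopA, hc, false_and, if_neg, ite_false, if_neg hh]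
      rw [creatLoopA_pos rest ([] ++ [c]) (0 + 1) (by omega)]
      simp [List.takeWhile_cons, h1]

lemma foldl_push (cs : List Char) (acc : String) :
    (List.foldl (fun a (i : Char) => a.push i) acc cs).toList = acc.toList ++ cs := by
  induction cs generalizing acc with
  | nil => simp
  | cons c rest ih => simp [List.foldl, ih]

lemma go_le (l : List Char) (c : Char) (k : ℕ) : PySem.Chars.rfind.go l [c] k ≤ (k : ℤ) := by
  induction k with
  | zero =>
    rw [PySem.Chars.rfind.go]
    split <;> simp
  | succ j ih =>
    rw [PySem.Chars.rfind.go]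
    split
    · omega
    · exact le_trans ih (by push_cast; omega)

lemma isPrefixOf_single (c : Char) (l : List Char) :
    [c].isPrefixOf l = true ↔ l.head? = some c := by
  cases l with
  | nil => simp [List.isPrefixOf]
  | cons a rest =>
    simp [List.isPrefixOf]
    exact eq_comm

-- The max of the two backwards scans: last-separator index, expressed through takeWhile on the reverse.
lemma go_max (l : List Char) (k : ℕ) (hk : k ≤ l.length) :
    max (PySem.Chars.rfind.go l ['/'] k) (PySem.Chars.rfind.go l ['\\'] k)
      = (min (k + 1) l.length : ℤ) - 1 - (((l.take (k + 1)).reverse.takeWhile notSep).length : ℤ) := by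
  induction k with
  | zero =>
    cases l with
    | nil =>
      rw [PySem.Chars.rfind.go, PySem.Chars.rfind.go]
      decide
    | cons a rest =>
      have htake : (a :: rest).take (0 + 1) = [a] := rfl
      have hlen : (a :: rest).length = rest.length + 1 := rfl
      rw [PySem.Chars.rfind.go, PySem.Chars.rfind.go, htake, hlen]
      by_cases h1 : a = '/'
      · rw [if_pos (by simp [List.isPrefixOf, h1]), if_neg (by simp [List.isPrefixOf, h1])]
        have hns : notSep a = false := by simp [notSep, h1]
        simp [List.takeWhile_cons, hns]
      · by_cases h2 : a = '\\'
        · rw [if_neg (by simp [List.isPrefixOf]; exact fun h => h1 h.symm), if_pos (by simp [List.isPrefixOf, h2])]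
          have hns : notSep a = false := by simp [notSep, h2]
          simp [List.takeWhile_cons, hns]
        · rw [if_neg (by simp [List.isPrefixOf]; exact fun h => h1 h.symm), if_neg (by simp [List.isPrefixOf]; exact fun h => h2 h.symm)]
          have hns : notSep a = true := by simp [notSep, h1, h2]
          simp [List.takeWhile_cons, hns]
  | succ j ih =>
    have hj : j ≤ l.length := by omega
    rw [PySem.Chars.rfind.go, PySem.Chars.rfind.go]
    by_cases hend : j + 1 = l.length
    · have hd : l.drop (j + 1) = [] := by
        rw [List.drop_eq_nil_iff]; omega
      have ht : l.take (j + 1 + 1) = l.take (j + 1) := by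
        rw [List.take_of_length_le (by omega), List.take_of_length_le (by omega)]
      rw [hd]
      have h1 : ¬ (List.isPrefixOf ['/'] ([] : List Char) = true) := by simp [List.isPrefixOf]
      have h2 : ¬ (List.isPrefixOf ['\\'] ([] : List Char) = true) := by simp [List.isPrefixOf]
      rw [if_neg h1, if_neg h2, ih hj, ht]
      omega
    · have hlt : j + 1 < l.length := by omega
      obtain ⟨a, ha⟩ : ∃ a, l[j + 1]? = some a := by
        simp [List.getElem?_eq_getElem hlt]
      have hhead : (l.drop (j + 1)).head? = some a := by
        rw [List.head?_drop, ha]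
      have htake : l.take (j + 1 + 1) = l.take (j + 1) ++ [a] := by
        rw [List.take_add_one, ha]
        rfl
      by_cases h1 : a = '/'
      · have hp1 : List.isPrefixOf ['/'] (l.drop (j + 1)) = true := by
          rw [isPrefixOf_single, hhead, h1]
        have hp2 : ¬ (List.isPrefixOf ['\\'] (l.drop (j + 1)) = true) := by
          rw [isPrefixOf_single, hhead]; simp [h1]
        rw [if_pos hp1, if_neg hp2, htake]
        have hle := go_le l '\\' j
        have hns : notSep a = false := by simp [notSep, h1]
        simp [List.takeWhile_cons, hns, List.length_take]
        omega
      · by_cases h2 : a = '\\'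
        · have hp1 : ¬ (List.isPrefixOf ['/'] (l.drop (j + 1)) = true) := by
            rw [isPrefixOf_single, hhead]; simp [h2]
          have hp2 : List.isPrefixOf ['\\'] (l.drop (j + 1)) = true := by
            rw [isPrefixOf_single, hhead, h2]
          rw [if_neg hp1, if_pos hp2, htake]
          have hle := go_le l '/' j
          have hns : notSep a = false := by simp [notSep, h2]
          simp [List.takeWhile_cons, hns, List.length_take]
          omega
        · have hp1 : ¬ (List.isPrefixOf ['/'] (l.drop (j + 1)) = true) := by
            rw [isPrefixOf_single, hhead]; simp [h1]
          have hp2 : ¬ (List.isPrefixOf ['\\'] (l.drop (j + 1)) = true) := by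
            rw [isPrefixOf_single, hhead]; simp [h2]
          have hns : notSep a = true := by
            simp [notSep, h1, h2]
          rw [if_neg hp1, if_neg hp2, ih hj, htake]
          have htw : ((l.take (j + 1)).reverse.takeWhile notSep).length ≤ j + 1 := by
            calc ((l.take (j + 1)).reverse.takeWhile notSep).length
                ≤ (l.take (j + 1)).reverse.length := (List.takeWhile_sublist _).length_le
              _ ≤ j + 1 := by simp [List.length_take]
          simp [List.takeWhile_cons, hns]
          omega

lemma drop_eq_reverse_takeWhile (l : List Char) :
    l.drop (l.length - (l.reverse.takeWhile notSep).length)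
      = (l.reverse.takeWhile notSep).reverse := by
  have hpre : l.reverse.takeWhile notSep <+: l.reverse := List.takeWhile_prefix _
  have htk : List.take (l.reverse.takeWhile notSep).length l.reverse
      = l.reverse.takeWhile notSep := (List.prefix_iff_eq_take.mp hpre).symm
  have h := @List.take_reverse _ l (l.reverse.takeWhile notSep).length
  rw [htk] at h
  conv_rhs => rw [h, List.reverse_reverse]

-- B's sliced name, as a character list, for an (already stripped) string s.
lemma alt_name_toList (s : String) :
    (PySem.Str.slice s (some (max (PySem.Str.rfind s "/") (PySem.Str.rfind s "\\") + 1)) none).toList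
      = (s.toList.reverse.takeWhile notSep).reverse := by
  set l := s.toList with hl
  have htw : (l.reverse.takeWhile notSep).length ≤ l.length := by
    calc (l.reverse.takeWhile notSep).length
        ≤ l.reverse.length := (List.takeWhile_sublist _).length_le
      _ = l.length := by simp
  have hr : max (PySem.Str.rfind s "/") (PySem.Str.rfind s "\\")
      = (l.length : ℤ) - 1 - ((l.reverse.takeWhile notSep).length : ℤ) := by
    have h1 : PySem.Str.rfind s "/" = PySem.Chars.rfind.go l ['/'] l.length := by
      rw [PySem.Str.rfind_eq]; rfl
    have h2 : PySem.Str.rfind s "\\" = PySem.Chars.rfind.go l ['\\'] l.length := by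
      rw [PySem.Str.rfind_eq]; rfl
    rw [h1, h2, go_max l l.length le_rfl,
      List.take_of_length_le (by omega : l.length ≤ l.length + 1)]
    omega
  rw [hr]
  have hnn : (0 : ℤ) ≤ (l.length : ℤ) - 1 - ((l.reverse.takeWhile notSep).length : ℤ) + 1 := by
    omega
  rw [PySem.Str.toList_slice, PySem.Chars.slice_eq_listSlice, ← hl,
    PySem.List.slice_from _ hnn]
  have hnat : ((l.length : ℤ) - 1 - ((l.reverse.takeWhile notSep).length : ℤ) + 1).toNat
      = l.length - (l.reverse.takeWhile notSep).length := by omega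
  rw [hnat]
  exact drop_eq_reverse_takeWhile l

-- Both programs assemble (name ++ "_database.csv", name); given A's loop result this settles the pair.
lemma pair_eq (s' : String) (chars : List Char)
    (h : chars = (s'.toList.reverse.takeWhile notSep).reverse) :
    ((List.foldl (fun acc (i : Char) => acc.push i) "" chars) ++ "_database.csv",
      List.foldl (fun acc (i : Char) => acc.push i) "" chars)
    = ((PySem.Str.slice s' (some (max (PySem.Str.rfind s' "/") (PySem.Str.rfind s' "\\") + 1)) none)
        ++ "_database.csv",
      PySem.Str.slice s' (some (max (PySem.Str.rfind s' "/") (PySem.Str.rfind s' "\\") + 1)) none) := by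
  have hname : List.foldl (fun acc (i : Char) => acc.push i) "" chars
      = PySem.Str.slice s' (some (max (PySem.Str.rfind s' "/") (PySem.Str.rfind s' "\\") + 1)) none := by
    apply String.toList_inj.mp
    rw [foldl_push, alt_name_toList, h]
    rfl
  rw [hname]

-- ===== VERDICT (by name: the statement is the Claim_ definition above) =====
theorem creat_file_name_spec : Claim_equal_creat_file_name := by
  intro file_info _
  unfold Spec_creat_file_name creat_file_name creat_file_name_alt
  by_cases hcond : file_info ≠ "" ∧
      (PySem.Str.pyGet? file_info (-1) = some '/' ∨ PySem.Str.pyGet? file_info (-1) = some '\\')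
  · -- last character is a separator: A's flag skips it, B slices it off
    simp only [if_pos hcond]
    have hlast : file_info.toList.getLast? = some '/' ∨ file_info.toList.getLast? = some '\\' := by
      have h := hcond.2
      rw [PySem.Str.pyGet?_eq, PySem.Chars.pyGet?_eq_listPyGet?, PySem.List.pyGet?_neg_one] at h
      exact h
    have hhead : file_info.toList.reverse.head? = some '/' ∨
        file_info.toList.reverse.head? = some '\\' := by
      simpa [List.head?_reverse] using hlast
    have hstoList : (PySem.Str.slice file_info none (some (-1))).toList
        = file_info.toList.dropLast := by
      rw [PySem.Str.toList_slice, PySem.Chars.slice_eq_listSlice, PySem.List.slice_to_neg_one]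
    have hA : (creatLoopA file_info.toList.reverse [] 0).reverse
        = ((PySem.Str.slice file_info none (some (-1))).toList.reverse.takeWhile notSep).reverse := by
      rw [creatLoopA_zero, if_pos hhead, List.tail_reverse, hstoList]
    exact pair_eq _ _ hA
  · -- no trailing separator
    simp only [if_neg hcond]
    have hlast : ¬ (file_info.toList.getLast? = some '/' ∨
        file_info.toList.getLast? = some '\\') := by
      intro h
      apply hcond
      constructor
      · intro hmt
        rw [hmt] at h
        simp at h
      · rw [PySem.Str.pyGet?_eq, PySem.Chars.pyGet?_eq_listPyGet?, PySem.List.pyGet?_neg_one]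
        exact h
    have hhead : ¬ (file_info.toList.reverse.head? = some '/' ∨
        file_info.toList.reverse.head? = some '\\') := by
      simpa [List.head?_reverse] using hlast
    have hA : (creatLoopA file_info.toList.reverse [] 0).reverse
        = (file_info.toList.reverse.takeWhile notSep).reverse := by
      rw [creatLoopA_zero, if_neg hhead]
    exact pair_eq _ _ hA
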